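-- pv_equiv track=rewrite | github.com/H-Ngyen/PracticeAlgorithm | ICPC/icpc_2025/ICPC_Northern/d.py | count_sequences_mod
-- ===== SOURCE A (Python) =====
-- def count_sequences_mod(N, K, M, P):
--     if K == 0:
--         return 1 % P
--     if K == 1:
--         return N % P
--
--     limit = N - (K - 1)
--     if limit <= 0:
--         return 0
--
--     Smax = (M - 1) * (K - 1)
--     dp = [0] * (Smax + 1)
--     dp[0] = 1
--
--     for _ in range(K - 1):
--         new_dp = [0] * (Smax + 1)
--         prefix = 0
--         for s in range(0, Smax + 1):
--             prefix += dp[s]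
--             if s - M >= 0:
--                 prefix -= dp[s - M]
--             new_dp[s] = prefix % P
--
--         dp = new_dp
--
--     res = 0
--     for s in range(0, min(Smax, limit - 1) + 1):
--         res = (res + (limit - s) * dp[s]) % P
--
--     return res
-- ===== SOURCE B (Python) =====
-- from math import comb
--
-- def count_sequences_mod(N, K, M, P):
--     # Closed form: answer = sum_j (-1)^j * C(K-1,j) * C(limit - j*M + K - 1, K)  (mod P),
--     # by inclusion-exclusion on ((1-x^M)/(1-x))^(K-1) and two hockey-stick summations.
--     if K == 0:
--         return 1 % P
--     if K == 1:
--         return N % P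
--     limit = N - (K - 1)
--     if limit <= 0:
--         return 0
--     res = 0
--     j = 0
--     while j < K and limit - j * M > 0:
--         res += (-1) ** j * comb(K - 1, j) * comb(limit - j * M + K - 1, K)
--         j += 1
--     return res % P
-- ===== Notes on version B (the rewrite author's own statement) =====
-- stated objective: alternative
-- what changed: Replaces A's dynamic-programming table (K-1 prefix-window convolution passes over a size-(M-1)(K-1)+1 array, then a weighted sum of its last row) by a direct evaluation of the inclusion-exclusion closed form sum_j (-1)^j*C(K-1,j)*C(limit-j*M+K-1,K) mod P.
-- outside the precondition, e.g. on count_sequences_mod(5, -3, 1, 100): A returns 9, B returns 0; on count_sequences_mod(5, -3, -2, 100): A returns 9, B returns 0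
import Mathlib
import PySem

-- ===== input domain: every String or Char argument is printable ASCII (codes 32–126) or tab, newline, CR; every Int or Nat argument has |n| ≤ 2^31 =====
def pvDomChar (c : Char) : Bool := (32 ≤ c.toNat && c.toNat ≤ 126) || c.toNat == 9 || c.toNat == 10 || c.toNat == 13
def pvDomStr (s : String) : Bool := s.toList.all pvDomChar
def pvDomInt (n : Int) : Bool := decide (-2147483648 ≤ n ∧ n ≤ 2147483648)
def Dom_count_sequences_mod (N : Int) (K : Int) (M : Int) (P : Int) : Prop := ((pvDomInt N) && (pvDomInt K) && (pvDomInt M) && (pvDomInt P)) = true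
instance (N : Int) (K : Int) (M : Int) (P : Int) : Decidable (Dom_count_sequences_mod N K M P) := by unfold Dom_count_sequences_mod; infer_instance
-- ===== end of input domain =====

-- B computes the same value by the inclusion-exclusion closed form
-- sum_j (-1)^j*C(K-1,j)*C(limit-j*M+K-1,K) mod P instead of A's dynamic-programming table.

-- ===== PORT A =====
-- Literal port of A's DP. new_dp is filled position by position in order s = 0..Smax,
-- rendered as building the list by appending; dp[s] / dp[s-M] reads are always in range
-- on inputs where A returns (Smax ≥ 0), rendered with pyGetD.
def count_sequences_mod (N : Int) (K : Int) (M : Int) (P : Int) : Int :=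
  if K = 0 then PySem.Int.mod 1 P
  else if K = 1 then PySem.Int.mod N P
  else
    let limit := N - (K - 1)
    if limit ≤ 0 then 0
    else
      let Smax := (M - 1) * (K - 1)
      -- dp = [0] * (Smax + 1); dp[0] = 1  (index 0 in range on every input A returns on)
      let dp0 : List Int := (List.replicate (Smax + 1).toNat 0).set 0 1
      let dp := (PySem.List.pyRange 0 (K - 1) 1).foldl (fun dp _ =>
        ((PySem.List.pyRange 0 (Smax + 1) 1).foldl (fun (st : List Int × Int) s =>
          let pre1 := st.2 + PySem.List.pyGetD dp s 0
          let pre2 := if 0 ≤ s - M then pre1 - PySem.List.pyGetD dp (s - M) 0 else pre1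
          (st.1 ++ [PySem.Int.mod pre2 P], pre2)) ([], 0)).1) dp0
      (PySem.List.pyRange 0 (min Smax (limit - 1) + 1) 1).foldl
        (fun res s => PySem.Int.mod (res + (limit - s) * PySem.List.pyGetD dp s 0) P) 0

-- ===== PORT B =====
-- math.comb; exact on the nonnegative arguments B's loop reaches.
def pvComb (n : Int) (k : Int) : Int := (Nat.choose n.toNat k.toNat : Int)

-- B's while loop: j advances while j < K and limit - j*M > 0.
def pvAltLoop (limit : Int) (K : Int) (M : Int) (j : Int) (res : Int) : Int :=
  if h : j < K ∧ 0 < limit - j * M then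
    pvAltLoop limit K M (j + 1)
      (res + (-1) ^ j.toNat * pvComb (K - 1) j * pvComb (limit - j * M + K - 1) K)
  else res
termination_by (K - j).toNat
decreasing_by omega

def count_sequences_mod_alt (N : Int) (K : Int) (M : Int) (P : Int) : Int :=
  if K = 0 then PySem.Int.mod 1 P
  else if K = 1 then PySem.Int.mod N P
  else
    let limit := N - (K - 1)
    if limit ≤ 0 then 0
    else PySem.Int.mod (pvAltLoop limit K M 0 0) P

-- ===== PRECONDITION & SPEC =====
-- Pre_ excludes: P = 0 (A raises ZeroDivisionError); K ≥ 2 with N-(K-1) > 0 and M ≤ 0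
-- (A raises IndexError on the empty dp table); and negative K with N-(K-1) > 0 — a negative
-- sequence length, outside the function's natural domain — where A raises (M ≥ 2) or
-- returns the leftover loop value (N-K+1) % P (M ≤ 1).
def Pre_count_sequences_mod (N : Int) (K : Int) (M : Int) (P : Int) : Prop :=
  P ≠ 0 ∧ (K = 0 ∨ K = 1 ∨ N - (K - 1) ≤ 0 ∨ (2 ≤ K ∧ 1 ≤ M))
instance (N : Int) (K : Int) (M : Int) (P : Int) : Decidable (Pre_count_sequences_mod N K M P) := by
  unfold Pre_count_sequences_mod; infer_instance

def pvWitness_count_sequences_mod : Int × Int × Int × Int := (10, 3, 2, 7)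

def Spec_count_sequences_mod (N : Int) (K : Int) (M : Int) (P : Int) (out : Int) : Prop := out = count_sequences_mod_alt N K M P
instance (N : Int) (K : Int) (M : Int) (P : Int) (out : Int) : Decidable (Spec_count_sequences_mod N K M P out) := by unfold Spec_count_sequences_mod; infer_instance

-- ===== CLAIM (what is proved, stated in full; the proofs are below) =====
def Claim_equal_count_sequences_mod : Prop := ∀ (N : Int) (K : Int) (M : Int) (P : Int), Dom_count_sequences_mod N K M P → Pre_count_sequences_mod N K M P → Spec_count_sequences_mod N K M P (count_sequences_mod N K M P)

-- ===== LEMMAS AND PROOFS =====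

-- Truncated binomial coefficient: C(n, k) for integer n, 0 for n < 0 (and = 0 for 0 ≤ n < k).
def pvC (n : Int) (k : Nat) : Int := if 0 ≤ n then (n.toNat.choose k : Int) else 0

-- pvF i k Mv s = Σ_{j=0}^{i} (-1)^j C(i,j) pvC (s - j·Mv + k) k : the alternating
-- inclusion-exclusion sum; for k = i+r-1 it is the r-fold prefix sum of the coefficients
-- of ((1-x^Mv)/(1-x))^i.
def pvF (i : Nat) (k : Nat) (Mv : Int) (s : Int) : Int :=
  ∑ j ∈ Finset.range (i + 1), (-1 : Int) ^ j * (i.choose j : Int) * pvC (s - (j : Int) * Mv + (k : Int)) k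

-- exact coefficients of ((1-x^M)/(1-x))^i, bootstrapped at i = 0
def pvc (i : Nat) (Mv : Int) (s : Int) : Int :=
  match i with
  | 0 => if s = 0 then 1 else 0
  | (i + 1) => pvF (i + 1) i Mv s

lemma pvC_of_lt {n : Int} {k : Nat} (h : n < (k : Int)) : pvC n k = 0 := by
  unfold pvC; split_ifs with h0
  · have : n.toNat < k := by omega
    simp [Nat.choose_eq_zero_of_lt this]
  · rfl

lemma pvC_pascal (n : Int) (k : Nat) : pvC (n + 1) (k + 1) = pvC n k + pvC n (k + 1) := by
  unfold pvC
  by_cases h : 0 ≤ n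
  · rw [if_pos (by omega : (0:Int) ≤ n + 1), if_pos h, if_pos h,
      show (n + 1).toNat = n.toNat + 1 by omega, Nat.choose_succ_succ]
    push_cast; ring
  · rw [if_neg h, if_neg h]
    by_cases h1 : 0 ≤ n + 1
    · rw [if_pos h1, show (n + 1).toNat = 0 by omega]
      simp
    · rw [if_neg h1]; norm_num

-- hockey-stick step in s, termwise Pascal
lemma pvF_step (i k : Nat) (Mv s : Int) :
    pvF i (k + 1) Mv s = pvF i (k + 1) Mv (s - 1) + pvF i k Mv s := by
  unfold pvF
  rw [← Finset.sum_add_distrib]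
  refine Finset.sum_congr rfl (fun j _ => ?_)
  push_cast
  rw [show s - 1 - (j : Int) * Mv + ((k : Int) + 1) = s - (j : Int) * Mv + (k : Int) by ring]
  rw [show s - (j : Int) * Mv + ((k : Int) + 1) = (s - (j : Int) * Mv + (k : Int)) + 1 by ring]
  rw [pvC_pascal]
  ring

lemma pvF_neg (i k : Nat) (Mv s : Int) (hM : 0 ≤ Mv) (hs : s < 0) : pvF i k Mv s = 0 := by
  unfold pvF
  refine Finset.sum_eq_zero (fun j _ => ?_)
  have h : s - (j : Int) * Mv + (k : Int) < (k : Int) := by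
    have : 0 ≤ (j : Int) * Mv := mul_nonneg (by positivity) hM
    omega
  simp [pvC_of_lt h]

-- prefix sums of pvF
lemma pvF_prefix (i k : Nat) (Mv : Int) (hM : 0 ≤ Mv) (n : Nat) :
    ∑ t ∈ Finset.range n, pvF i k Mv (t : Int) = pvF i (k + 1) Mv ((n : Int) - 1) := by
  induction n with
  | zero =>
      rw [Finset.sum_range_zero]
      exact (pvF_neg i (k + 1) Mv ((0 : Int) - 1) hM (by norm_num)).symm
  | succ n ih =>
      rw [Finset.sum_range_succ, ih,
        show ((n + 1 : Nat) : Int) - 1 = (n : Int) by push_cast; ring,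
        pvF_step i k Mv (n : Int)]

-- alternating-sum Pascal recombination
lemma alt_pascal (i : Nat) (A : Nat → Int) :
    ∑ j ∈ Finset.range (i + 2), (-1 : Int) ^ j * ((i + 1).choose j : Int) * A j
  = ∑ j ∈ Finset.range (i + 1), (-1 : Int) ^ j * (i.choose j : Int) * A j
    - ∑ j ∈ Finset.range (i + 1), (-1 : Int) ^ j * (i.choose j : Int) * A (j + 1) := by
  have e0 : ∑ j ∈ Finset.range (i + 2), (-1 : Int) ^ j * (i.choose j : Int) * A j
      = ∑ j ∈ Finset.range (i + 1), (-1 : Int) ^ j * (i.choose j : Int) * A j := by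
    rw [Finset.sum_range_succ, Nat.choose_succ_self]
    simp
  calc ∑ j ∈ Finset.range (i + 2), (-1 : Int) ^ j * ((i + 1).choose j : Int) * A j
      = (∑ j ∈ Finset.range (i + 1), (-1 : Int) ^ (j + 1) * ((i + 1).choose (j + 1) : Int) * A (j + 1))
        + (-1 : Int) ^ 0 * ((i + 1).choose 0 : Int) * A 0 :=
        Finset.sum_range_succ' (fun j => (-1 : Int) ^ j * ((i + 1).choose j : Int) * A j) (i + 1)
    _ = (∑ j ∈ Finset.range (i + 1),
          ((-1 : Int) ^ (j + 1) * (i.choose (j + 1) : Int) * A (j + 1)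
            + (-((-1 : Int) ^ j * (i.choose j : Int) * A (j + 1))))) + A 0 := by
        rw [show (-1 : Int) ^ 0 * ((i + 1).choose 0 : Int) * A 0 = A 0 by simp]
        congr 1
        refine Finset.sum_congr rfl (fun j _ => ?_)
        rw [Nat.choose_succ_succ]
        push_cast
        ring
    _ = ((∑ j ∈ Finset.range (i + 1), (-1 : Int) ^ (j + 1) * (i.choose (j + 1) : Int) * A (j + 1)) + A 0)
        - ∑ j ∈ Finset.range (i + 1), (-1 : Int) ^ j * (i.choose j : Int) * A (j + 1) := by
        rw [Finset.sum_add_distrib, Finset.sum_neg_distrib]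
        ring
    _ = (∑ j ∈ Finset.range (i + 2), (-1 : Int) ^ j * (i.choose j : Int) * A j)
        - ∑ j ∈ Finset.range (i + 1), (-1 : Int) ^ j * (i.choose j : Int) * A (j + 1) := by
        rw [Finset.sum_range_succ' (fun j => (-1 : Int) ^ j * (i.choose j : Int) * A j) (i + 1)]
        simp
    _ = _ := by rw [e0]

-- window step: pvF (i+1) k s = pvF i k s - pvF i k (s - Mv)
lemma pvF_window (i k : Nat) (Mv s : Int) :
    pvF (i + 1) k Mv s = pvF i k Mv s - pvF i k Mv (s - Mv) := by
  unfold pvF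
  have h := alt_pascal i (fun j => pvC (s - (j : Int) * Mv + (k : Int)) k)
  rw [show i + 1 + 1 = i + 2 from rfl, h]
  congr 1
  refine Finset.sum_congr rfl (fun j _ => ?_)
  congr 2
  push_cast
  ring

-- prefix sums of the exact coefficients
lemma pvF_zero (Mv s : Int) : pvF 0 0 Mv s = (if 0 ≤ s then 1 else 0) := by
  unfold pvF pvC
  simp

lemma pvc_prefix (i : Nat) (Mv : Int) (hM : 0 ≤ Mv) (n : Nat) :
    ∑ t ∈ Finset.range n, pvc i Mv (t : Int) = pvF i i Mv ((n : Int) - 1) := by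
  cases i with
  | zero =>
      induction n with
      | zero => simp [pvF_zero]
      | succ n ih =>
          rw [Finset.sum_range_succ, ih, pvF_zero, pvF_zero]
          simp only [pvc]
          push_cast
          split_ifs <;> omega
  | succ i =>
      simpa [pvc] using pvF_prefix (i + 1) i Mv hM n

-- coefficients vanish above (Mv-1)*i
lemma pvc_vanish (i : Nat) (Mv : Int) (hM : 1 ≤ Mv) :
    ∀ s : Int, (Mv - 1) * (i : Int) < s → pvc i Mv s = 0 := by
  induction i with
  | zero =>
      intro s hs
      simp only [pvc]
      rw [if_neg (by push_cast at hs; omega)]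
  | succ i ih =>
      intro s hs
      have hnn : (0 : Int) ≤ (Mv - 1) * (i : Int) := mul_nonneg (by omega) (by positivity)
      have hexp : (Mv - 1) * ((i + 1 : Nat) : Int) = (Mv - 1) * (i : Int) + (Mv - 1) := by
        push_cast; ring
      rw [hexp] at hs
      have hsM : (Mv - 1) * (i : Int) ≤ s - Mv := by linarith
      have hs0 : 0 ≤ s := by linarith
      have e1 : pvF i i Mv s = ∑ t ∈ Finset.range (s + 1).toNat, pvc i Mv (t : Int) := by
        rw [pvc_prefix i Mv (by omega) ((s + 1).toNat)]
        congr 1; omega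
      have e2 : pvF i i Mv (s - Mv) = ∑ t ∈ Finset.range (s - Mv + 1).toNat, pvc i Mv (t : Int) := by
        rw [pvc_prefix i Mv (by omega) ((s - Mv + 1).toNat)]
        congr 1; omega
      have hle : (s - Mv + 1).toNat ≤ (s + 1).toNat := by omega
      simp only [pvc]
      rw [pvF_window i i Mv s, e1, e2, ← Finset.sum_Ico_eq_sub _ hle]
      refine Finset.sum_eq_zero (fun t ht => ?_)
      rw [Finset.mem_Ico] at ht
      have h1 : s - Mv + 1 ≤ (t : Int) := by omega
      exact ih (t : Int) (by linarith)

-- ---- congruence helpers (Python % = Int.fmod) ----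
lemma pvfmod_self_modeq (a P : Int) : Int.fmod a P ≡ a [ZMOD P] := by
  rw [Int.modEq_iff_dvd]
  exact ⟨a.fdiv P, by have := Int.fmod_add_mul_fdiv a P; linarith⟩

lemma pvfmod_congr {P a b : Int} (h : a ≡ b [ZMOD P]) : Int.fmod a P = Int.fmod b P := by
  rw [Int.fmod_eq_fmod_iff_fmod_sub_eq_zero]
  exact (PySem.Int.mod_eq_zero_iff_dvd (a - b) P).2 (Int.modEq_iff_dvd.mp h.symm)

lemma pvfmod_absorb (a b P : Int) : Int.fmod (Int.fmod a P + b) P = Int.fmod (a + b) P := by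
  rw [Int.add_fmod, Int.fmod_fmod_of_dvd _ dvd_rfl, ← Int.add_fmod]

lemma pvmod_self_modeq (a P : Int) : PySem.Int.mod a P ≡ a [ZMOD P] := pvfmod_self_modeq a P

lemma pvmod_congr {P a b : Int} (h : a ≡ b [ZMOD P]) : PySem.Int.mod a P = PySem.Int.mod b P :=
  pvfmod_congr h

lemma pvmod_absorb (a b P : Int) : PySem.Int.mod (PySem.Int.mod a P + b) P = PySem.Int.mod (a + b) P :=
  pvfmod_absorb a b P

-- ---- port-A side: the dp table ----

-- lookup into a table built as (List.range m).map f
lemma pv_lookup (f : Nat → Int) (m s : Nat) (hs : s < m) :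
    PySem.List.pyGetD ((List.range m).map (fun t => f t)) ((s : Nat) : Int) 0 = f s := by
  rw [PySem.List.pyGetD_of_nonneg _ _ (by positivity)]
  rw [Int.toNat_natCast]
  exact PySem.List.getD_map_range f m s 0 hs

-- the initial table [0]*(Smax+1) with dp[0] = 1
lemma pv_dp0 (m : Nat) (_hm : 1 ≤ m) :
    (List.replicate m (0 : Int)).set 0 1 = (List.range m).map (fun t => if t = 0 then (1 : Int) else 0) := by
  apply List.ext_getElem
  · simp
  · intro n h1 h2
    simp only [List.getElem_set, List.getElem_replicate, List.getElem_map, List.getElem_range]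
    split_ifs with h3 h4 h4 <;> first | rfl | omega

-- running window sum over the current table
def pvW (dp : List Int) (M : Int) (x : Int) : Int :=
  (∑ t ∈ Finset.range (x + 1).toNat, PySem.List.pyGetD dp ((t : Nat) : Int) 0)
    - ∑ t ∈ Finset.range (x - M + 1).toNat, PySem.List.pyGetD dp ((t : Nat) : Int) 0

lemma pvW_neg (dp : List Int) (M x : Int) (hM : 1 ≤ M) (hx : x < 0) : pvW dp M x = 0 := by
  unfold pvW
  rw [show (x + 1).toNat = 0 by omega, show (x - M + 1).toNat = 0 by omega]
  simp

lemma pvW_succ (dp : List Int) (M x : Int) (hx : 0 ≤ x) :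
    pvW dp M x = pvW dp M (x - 1) + PySem.List.pyGetD dp x 0
      - (if 0 ≤ x - M then PySem.List.pyGetD dp (x - M) 0 else 0) := by
  unfold pvW
  have h1 : (x + 1).toNat = (x - 1 + 1).toNat + 1 := by omega
  rw [h1, Finset.sum_range_succ, show (((x - 1 + 1).toNat : Nat) : Int) = x by omega]
  by_cases h2 : 0 ≤ x - M
  · rw [if_pos h2, show (x - M + 1).toNat = (x - 1 - M + 1).toNat + 1 by omega,
      Finset.sum_range_succ, show (((x - 1 - M + 1).toNat : Nat) : Int) = x - M by omega]
    ring
  · rw [if_neg h2, show (x - M + 1).toNat = (x - 1 - M + 1).toNat by omega]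
    ring

-- the zeta-reduced body of one inner pass (what A's loop body computes)
def pvInnerPass (M P Smax : Int) (dp : List Int) : List Int :=
  ((PySem.List.pyRange 0 (Smax + 1) 1).foldl (fun (st : List Int × Int) s =>
      (st.1 ++ [PySem.Int.mod (if 0 ≤ s - M then st.2 + PySem.List.pyGetD dp s 0 - PySem.List.pyGetD dp (s - M) 0 else st.2 + PySem.List.pyGetD dp s 0) P],
        if 0 ≤ s - M then st.2 + PySem.List.pyGetD dp s 0 - PySem.List.pyGetD dp (s - M) 0 else st.2 + PySem.List.pyGetD dp s 0)) ([], 0)).1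

-- one pass of the inner loop
lemma pv_inner (dp : List Int) (M P : Int) (hM : 1 ≤ M) (n : Nat) :
    (PySem.List.pyRange 0 ((n : Nat) : Int) 1).foldl (fun (st : List Int × Int) s =>
        (st.1 ++ [PySem.Int.mod (if 0 ≤ s - M then st.2 + PySem.List.pyGetD dp s 0 - PySem.List.pyGetD dp (s - M) 0 else st.2 + PySem.List.pyGetD dp s 0) P],
          if 0 ≤ s - M then st.2 + PySem.List.pyGetD dp s 0 - PySem.List.pyGetD dp (s - M) 0 else st.2 + PySem.List.pyGetD dp s 0)) ([], 0)
      = ((List.range n).map (fun s => PySem.Int.mod (pvW dp M ((s : Nat) : Int)) P),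
          pvW dp M (((n : Nat) : Int) - 1)) := by
  induction n with
  | zero =>
      rw [show (((0 : Nat) : Nat) : Int) = 0 by norm_num, PySem.List.pyRange_one_eq_nil le_rfl]
      rw [List.foldl_nil, List.range_zero, List.map_nil,
        pvW_neg dp M ((0 : Int) - 1) hM (by norm_num)]
  | succ n ih =>
      rw [show (((n + 1 : Nat) : Nat) : Int) = ((n : Nat) : Int) + 1 by push_cast; ring,
        PySem.List.pyRange_one_succ_right (by positivity), List.foldl_append, ih]
      simp only [List.foldl_cons, List.foldl_nil]
      have hW : pvW dp M (((n : Nat) : Int) - 1) + PySem.List.pyGetD dp ((n : Nat) : Int) 0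
          - (if 0 ≤ ((n : Nat) : Int) - M then PySem.List.pyGetD dp (((n : Nat) : Int) - M) 0 else 0)
          = pvW dp M ((n : Nat) : Int) := (pvW_succ dp M _ (by positivity)).symm
      rw [List.range_succ, List.map_append]
      have hsplit : (if 0 ≤ ((n : Nat) : Int) - M then
            pvW dp M (((n : Nat) : Int) - 1) + PySem.List.pyGetD dp ((n : Nat) : Int) 0
              - PySem.List.pyGetD dp (((n : Nat) : Int) - M) 0
          else pvW dp M (((n : Nat) : Int) - 1) + PySem.List.pyGetD dp ((n : Nat) : Int) 0)
          = pvW dp M (((n : Nat) : Int) - 1) + PySem.List.pyGetD dp ((n : Nat) : Int) 0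
            - (if 0 ≤ ((n : Nat) : Int) - M then PySem.List.pyGetD dp (((n : Nat) : Int) - M) 0 else 0) := by
        split_ifs <;> ring
      rw [hsplit, hW, show ((n : Nat) : Int) + 1 - 1 = ((n : Nat) : Int) by ring]
      simp

-- folding a function that ignores the list elements is iteration
lemma pv_foldl_const (G : List Int → Int → List Int) (F : List Int → List Int)
    (hG : ∀ d x, G d x = F d) (xs : List Int) (init : List Int) :
    List.foldl G init xs = F^[xs.length] init := by
  induction xs generalizing init with
  | nil => rfl
  | cons x xs ih => rw [List.foldl_cons, hG, ih, List.length_cons, Function.iterate_succ_apply]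

-- the dp table after n outer iterations: entries ≡ pvc n mod P
lemma pv_dp_invariant (M P Smax : Int) (m : Nat) (hM : 1 ≤ M) (hS : 0 ≤ Smax) (hb : Smax + 1 = ((m : Nat) : Int)) (n : Nat) :
    ∃ e : Nat → Int,
      (pvInnerPass M P Smax)^[n] ((List.replicate m (0 : Int)).set 0 1)
        = (List.range m).map (fun s => e s)
      ∧ ∀ s : Nat, s < m → e s ≡ pvc n M ((s : Nat) : Int) [ZMOD P] := by
  induction n with
  | zero =>
      refine ⟨fun s => if s = 0 then 1 else 0, ?_, ?_⟩
      · rw [Function.iterate_zero_apply]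
        exact pv_dp0 m (by omega)
      · intro s _
        by_cases h : s = 0 <;> simp [pvc, h]
  | succ n ih =>
      obtain ⟨e, hlist, hcong⟩ := ih
      rw [Function.iterate_succ_apply', hlist]
      unfold pvInnerPass
      rw [hb, pv_inner ((List.range m).map (fun t => e t)) M P hM m]
      refine ⟨fun s => PySem.Int.mod (pvW ((List.range m).map (fun t => e t)) M ((s : Nat) : Int)) P, rfl, ?_⟩
      intro s hs
      have hW1 : pvW ((List.range m).map (fun t => e t)) M ((s : Nat) : Int)
          = (∑ t ∈ Finset.range (s + 1), e t)
            - ∑ t ∈ Finset.range (((s : Nat) : Int) - M + 1).toNat, e t := by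
        unfold pvW
        congr 1
        · rw [show (((s : Nat) : Int) + 1).toNat = s + 1 by omega]
          refine Finset.sum_congr rfl (fun t ht => ?_)
          exact pv_lookup e m t (by rw [Finset.mem_range] at ht; omega)
        · refine Finset.sum_congr rfl (fun t ht => ?_)
          refine pv_lookup e m t ?_
          rw [Finset.mem_range] at ht
          omega
      have h2 : (∑ t ∈ Finset.range (s + 1), e t)
          ≡ ∑ t ∈ Finset.range (s + 1), pvc n M ((t : Nat) : Int) [ZMOD P] :=
        Int.ModEq.sum (fun t ht => hcong t (by rw [Finset.mem_range] at ht; omega))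
      have h3 : (∑ t ∈ Finset.range (((s : Nat) : Int) - M + 1).toNat, e t)
          ≡ ∑ t ∈ Finset.range (((s : Nat) : Int) - M + 1).toNat, pvc n M ((t : Nat) : Int) [ZMOD P] :=
        Int.ModEq.sum (fun t ht => hcong t (by rw [Finset.mem_range] at ht; omega))
      have h4 : ∑ t ∈ Finset.range (s + 1), pvc n M ((t : Nat) : Int) = pvF n n M ((s : Nat) : Int) := by
        rw [pvc_prefix n M (by omega) (s + 1)]
        congr 1; push_cast; ring
      have h5 : ∑ t ∈ Finset.range (((s : Nat) : Int) - M + 1).toNat, pvc n M ((t : Nat) : Int)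
          = pvF n n M (((s : Nat) : Int) - M) := by
        rw [pvc_prefix n M (by omega) _]
        by_cases hc : 0 ≤ ((s : Nat) : Int) - M
        · congr 1; omega
        · rw [show (((((s : Nat) : Int) - M + 1).toNat : Nat) : Int) - 1 = -1 by omega,
            pvF_neg n n M (-1) (by omega) (by norm_num),
            pvF_neg n n M (((s : Nat) : Int) - M) (by omega) (by omega)]
      have h6 : pvF n n M ((s : Nat) : Int) - pvF n n M (((s : Nat) : Int) - M)
          = pvc (n + 1) M ((s : Nat) : Int) := by
        rw [← pvF_window n n M]
        rfl
      have hmain : pvW ((List.range m).map (fun t => e t)) M ((s : Nat) : Int)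
          ≡ pvc (n + 1) M ((s : Nat) : Int) [ZMOD P] := by
        rw [hW1, ← h6, ← h4, ← h5]
        exact Int.ModEq.sub h2 h3
      exact (pvmod_self_modeq _ P).trans hmain

-- the final result loop of A: accumulated mod of a weighted sum
lemma pv_res_fold (limit P : Int) (dp : List Int) (n : Nat) (hn : 1 ≤ n) :
    (PySem.List.pyRange 0 ((n : Nat) : Int) 1).foldl
        (fun res s => PySem.Int.mod (res + (limit - s) * PySem.List.pyGetD dp s 0) P) 0
      = PySem.Int.mod (∑ s ∈ Finset.range n, (limit - ((s : Nat) : Int)) * PySem.List.pyGetD dp ((s : Nat) : Int) 0) P := by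
  induction n with
  | zero => omega
  | succ n ih =>
      rcases Nat.eq_zero_or_pos n with h0 | h0
      · subst h0
        rw [show (((1 : Nat) : Nat) : Int) = 0 + 1 by norm_num, PySem.List.pyRange_one_singleton]
        simp only [List.foldl_cons, List.foldl_nil, Finset.sum_range_one, Nat.cast_zero,
          sub_zero, zero_add]
      · rw [show (((n + 1 : Nat) : Nat) : Int) = ((n : Nat) : Int) + 1 by push_cast; ring,
          PySem.List.pyRange_one_succ_right (by positivity), List.foldl_append, ih h0]
        simp only [List.foldl_cons, List.foldl_nil]
        rw [pvmod_absorb, Finset.sum_range_succ]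

-- B's loop as a truncated alternating sum
def pvTerm (limit K M : Int) (q : Int) : Int :=
  if 0 < limit - q * M then (-1) ^ q.toNat * pvComb (K - 1) q * pvComb (limit - q * M + K - 1) K else 0

lemma pv_altLoop_eq (limit K M : Int) (hM : 1 ≤ M) :
    ∀ (n : Nat) (j res : Int), 0 ≤ j → (K - j).toNat = n →
    pvAltLoop limit K M j res = res + ∑ x ∈ Finset.range n, pvTerm limit K M (j + (x : Int)) := by
  intro n
  induction n with
  | zero =>
      intro j res hj hn
      rw [pvAltLoop, dif_neg (by omega)]
      simp
  | succ n ih =>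
      intro j res hj hn
      rw [pvAltLoop]
      by_cases h : j < K ∧ 0 < limit - j * M
      · rw [dif_pos h, ih (j + 1) _ (by omega) (by omega)]
        rw [Finset.sum_range_succ' (fun x => pvTerm limit K M (j + ((x : Nat) : Int))) n]
        have hf0 : pvTerm limit K M (j + (((0 : Nat) : Nat) : Int))
            = (-1) ^ j.toNat * pvComb (K - 1) j * pvComb (limit - j * M + K - 1) K := by
          unfold pvTerm
          rw [show j + (((0 : Nat) : Nat) : Int) = j by norm_num, if_pos h.2]
        have hsum : (∑ x ∈ Finset.range n, pvTerm limit K M ((j + 1) + ((x : Nat) : Int)))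
            = ∑ x ∈ Finset.range n, pvTerm limit K M (j + (((x + 1 : Nat) : Nat) : Int)) := by
          refine Finset.sum_congr rfl (fun x _ => ?_)
          congr 1; push_cast; ring
        rw [hsum, hf0]
        ring
      · rw [dif_neg h]
        have hjK : j < K := by omega
        have hlim : limit - j * M ≤ 0 := by
          by_contra hc
          exact h ⟨hjK, by omega⟩
        have hz : ∀ x ∈ Finset.range (n + 1), pvTerm limit K M (j + ((x : Nat) : Int)) = 0 := by
          intro x _
          unfold pvTerm
          rw [if_neg ?_]
          have h1 : (0 : Int) ≤ ((x : Nat) : Int) * M := mul_nonneg (by positivity) (by omega)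
          have h2 : (j + ((x : Nat) : Int)) * M = j * M + ((x : Nat) : Int) * M := by ring
          omega
        rw [Finset.sum_eq_zero hz]
        ring

-- B's sum is the double-prefix closed form
lemma pv_B_sum (limit K M : Int) (hK : 2 ≤ K) (_hlim : 0 < limit) (hM : 1 ≤ M) :
    pvAltLoop limit K M 0 0 = pvF (K - 1).toNat ((K - 1).toNat + 1) M (limit - 1) := by
  rw [pv_altLoop_eq limit K M hM ((K - 0).toNat) 0 0 le_rfl rfl,
    show (K - 0).toNat = (K - 1).toNat + 1 by omega, zero_add]
  unfold pvF
  refine Finset.sum_congr rfl (fun x hx => ?_)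
  rw [show (0 : Int) + ((x : Nat) : Int) = ((x : Nat) : Int) by ring]
  unfold pvTerm
  by_cases hc : 0 < limit - ((x : Nat) : Int) * M
  · rw [if_pos hc]
    have e1 : pvComb (K - 1) ((x : Nat) : Int) = (((K - 1).toNat.choose x : Nat) : Int) := by
      unfold pvComb
      rw [Int.toNat_natCast]
    have e2 : pvComb (limit - ((x : Nat) : Int) * M + K - 1) K
        = pvC (limit - 1 - ((x : Nat) : Int) * M + (((K - 1).toNat + 1 : Nat) : Int)) ((K - 1).toNat + 1) := by
      unfold pvComb pvC
      rw [if_pos (by push_cast; omega)]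
      have ha : (limit - ((x : Nat) : Int) * M + K - 1).toNat
          = (limit - 1 - ((x : Nat) : Int) * M + (((K - 1).toNat + 1 : Nat) : Int)).toNat := by omega
      have hb : K.toNat = (K - 1).toNat + 1 := by omega
      rw [ha, hb]
    rw [show ((-1 : Int)) ^ ((((x : Nat) : Int)).toNat) = (-1 : Int) ^ x by rw [Int.toNat_natCast],
      e1, e2]
  · rw [if_neg hc]
    have e3 : pvC (limit - 1 - ((x : Nat) : Int) * M + (((K - 1).toNat + 1 : Nat) : Int)) ((K - 1).toNat + 1) = 0 :=
      pvC_of_lt (by push_cast; omega)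
    rw [e3, mul_zero]

-- double counting: Σ (L - s) f s = Σ of prefix sums
lemma pv_double (L : Nat) (f : Nat → Int) :
    ∑ s ∈ Finset.range L, (((L : Nat) : Int) - ((s : Nat) : Int)) * f s
      = ∑ s ∈ Finset.range L, ∑ t ∈ Finset.range (s + 1), f t := by
  induction L with
  | zero => simp
  | succ L ih =>
      rw [Finset.sum_range_succ (fun s => ∑ t ∈ Finset.range (s + 1), f t) L, ← ih]
      have hstep : ∀ s : Nat, (((L + 1 : Nat) : Int) - ((s : Nat) : Int)) * f s
          = (((L : Nat) : Int) - ((s : Nat) : Int)) * f s + f s := by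
        intro s; push_cast; ring
      rw [Finset.sum_congr rfl (fun s _ => hstep s), Finset.sum_add_distrib,
        Finset.sum_range_succ (fun s => (((L : Nat) : Int) - ((s : Nat) : Int)) * f s) L]
      simp

-- ===== VERDICT (by name: the statement is the Claim_ definition above) =====
-- ===== VERDICT (by name: the statement is the Claim_ definition above) =====
-- ===== VERDICT (by name: the statement is the Claim_ definition above) =====
theorem count_sequences_mod_spec : Claim_equal_count_sequences_mod := by
  intro N K M P _hdom hpre
  obtain ⟨hP, hcases⟩ := hpre
  simp only [Spec_count_sequences_mod, count_sequences_mod, count_sequences_mod_alt]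
  by_cases hK0 : K = 0
  · rw [if_pos hK0, if_pos hK0]
  rw [if_neg hK0, if_neg hK0]
  by_cases hK1 : K = 1
  · rw [if_pos hK1, if_pos hK1]
  rw [if_neg hK1, if_neg hK1]
  by_cases hlim : N - (K - 1) ≤ 0
  · rw [if_pos hlim, if_pos hlim]
  rw [if_neg hlim, if_neg hlim]
  have hK2 : 2 ≤ K := by rcases hcases with h|h|h|h <;> omega
  have hM : 1 ≤ M := by rcases hcases with h|h|h|h <;> omega
  replace hlim : 0 < N - (K - 1) := by omega
  have hS0 : (0 : Int) ≤ (M - 1) * (K - 1) := mul_nonneg (by omega) (by omega)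
  set m := ((M - 1) * (K - 1) + 1).toNat with hmdef
  have hb : (M - 1) * (K - 1) + 1 = ((m : Nat) : Int) := by omega
  have hout := pv_foldl_const
      (fun dp (x : Int) =>
        (List.foldl
            (fun (st : List Int × Int) s =>
              (st.1 ++ [PySem.Int.mod (if 0 ≤ s - M then st.2 + PySem.List.pyGetD dp s 0 - PySem.List.pyGetD dp (s - M) 0 else st.2 + PySem.List.pyGetD dp s 0) P],
                if 0 ≤ s - M then st.2 + PySem.List.pyGetD dp s 0 - PySem.List.pyGetD dp (s - M) 0 else st.2 + PySem.List.pyGetD dp s 0))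
            ([], 0) (PySem.List.pyRange 0 ((M - 1) * (K - 1) + 1) 1)).1)
      (pvInnerPass M P ((M - 1) * (K - 1)))
      (fun d x => rfl)
      (PySem.List.pyRange 0 (K - 1) 1)
      ((List.replicate m (0 : Int)).set 0 1)
  rw [hout]
  have hlen : (PySem.List.pyRange 0 (K - 1) 1).length = (K - 1).toNat := by
    rw [PySem.List.length_pyRange_one]
    norm_num
  rw [hlen]
  obtain ⟨e, hlist, hcong⟩ :=
    pv_dp_invariant M P ((M - 1) * (K - 1)) m hM hS0 hb (K - 1).toNat
  rw [hlist]
  set T := min ((M - 1) * (K - 1)) (N - (K - 1) - 1) + 1 with hTdef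
  have hT1 : 1 ≤ T := by omega
  have hTm : T ≤ (M - 1) * (K - 1) + 1 := by omega
  have hTe : T = ((T.toNat : Nat) : Int) := by omega
  rw [hTe, pv_res_fold (N - (K - 1)) P ((List.range m).map (fun s => e s)) T.toNat (by omega)]
  rw [pv_B_sum (N - (K - 1)) K M hK2 hlim hM]
  have hiK : (((K - 1).toNat : Nat) : Int) = K - 1 := by omega
  have hA1 : ∑ s ∈ Finset.range T.toNat,
        (N - (K - 1) - ((s : Nat) : Int)) * PySem.List.pyGetD ((List.range m).map (fun s => e s)) ((s : Nat) : Int) 0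
      = ∑ s ∈ Finset.range T.toNat, (N - (K - 1) - ((s : Nat) : Int)) * e s := by
    refine Finset.sum_congr rfl (fun s hs => ?_)
    rw [Finset.mem_range] at hs
    rw [pv_lookup e m s (by omega)]
  have hA2 : (∑ s ∈ Finset.range T.toNat, (N - (K - 1) - ((s : Nat) : Int)) * e s)
      ≡ ∑ s ∈ Finset.range T.toNat, (N - (K - 1) - ((s : Nat) : Int)) * pvc (K - 1).toNat M ((s : Nat) : Int) [ZMOD P] :=
    Int.ModEq.sum (fun s hs => Int.ModEq.mul_left _
      (hcong s (by rw [Finset.mem_range] at hs; omega)))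
  have hA3 : ∑ s ∈ Finset.range T.toNat, (N - (K - 1) - ((s : Nat) : Int)) * pvc (K - 1).toNat M ((s : Nat) : Int)
      = ∑ s ∈ Finset.range (N - (K - 1)).toNat, (N - (K - 1) - ((s : Nat) : Int)) * pvc (K - 1).toNat M ((s : Nat) : Int) := by
    by_cases hcmp : N - (K - 1) - 1 ≤ (M - 1) * (K - 1)
    · rw [show T.toNat = (N - (K - 1)).toNat by omega]
    · have hTm2 : T.toNat = m := by omega
      have hmL : m ≤ (N - (K - 1)).toNat := by omega
      have hz : ∑ s ∈ Finset.Ico m (N - (K - 1)).toNat,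
          (N - (K - 1) - ((s : Nat) : Int)) * pvc (K - 1).toNat M ((s : Nat) : Int) = 0 := by
        refine Finset.sum_eq_zero (fun s hs => ?_)
        rw [Finset.mem_Ico] at hs
        rw [pvc_vanish (K - 1).toNat M hM ((s : Nat) : Int) (by rw [hiK]; omega), mul_zero]
      have := Finset.sum_Ico_eq_sub
        (fun s => (N - (K - 1) - ((s : Nat) : Int)) * pvc (K - 1).toNat M ((s : Nat) : Int)) hmL
      rw [hz] at this
      rw [hTm2]
      linarith
  have hA4 : ∑ s ∈ Finset.range (N - (K - 1)).toNat, (N - (K - 1) - ((s : Nat) : Int)) * pvc (K - 1).toNat M ((s : Nat) : Int)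
      = pvF (K - 1).toNat ((K - 1).toNat + 1) M (N - (K - 1) - 1) := by
    have hLL : (((N - (K - 1)).toNat : Nat) : Int) = N - (K - 1) := by omega
    calc ∑ s ∈ Finset.range (N - (K - 1)).toNat, (N - (K - 1) - ((s : Nat) : Int)) * pvc (K - 1).toNat M ((s : Nat) : Int)
        = ∑ s ∈ Finset.range (N - (K - 1)).toNat,
            ((((N - (K - 1)).toNat : Nat) : Int) - ((s : Nat) : Int)) * pvc (K - 1).toNat M ((s : Nat) : Int) := by
          rw [hLL]
      _ = ∑ s ∈ Finset.range (N - (K - 1)).toNat, ∑ t ∈ Finset.range (s + 1), pvc (K - 1).toNat M ((t : Nat) : Int) :=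
          pv_double (N - (K - 1)).toNat (fun s => pvc (K - 1).toNat M ((s : Nat) : Int))
      _ = ∑ s ∈ Finset.range (N - (K - 1)).toNat, pvF (K - 1).toNat (K - 1).toNat M ((s : Nat) : Int) := by
          refine Finset.sum_congr rfl (fun s _ => ?_)
          rw [pvc_prefix (K - 1).toNat M (by omega) (s + 1)]
          congr 1; push_cast; ring
      _ = pvF (K - 1).toNat ((K - 1).toNat + 1) M ((((N - (K - 1)).toNat : Nat) : Int) - 1) :=
          pvF_prefix (K - 1).toNat (K - 1).toNat M (by omega) (N - (K - 1)).toNat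
      _ = pvF (K - 1).toNat ((K - 1).toNat + 1) M (N - (K - 1) - 1) := by rw [hLL]
  rw [hA1, pvmod_congr hA2, hA3, hA4]
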